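-- pv_equiv track=rewrite | github.com/AlgorithmFan/TM-Recommend | MarUserModel.py | buildNGram
-- ===== SOURCE A (Python) =====
-- def buildNGram(states, gram_n):
--     statesFrozen = [frozenset([s]) for s in states]
--     statesDict = {1: set(statesFrozen)}
--     for i in range(gram_n-1):
--         temp = set()
--         for j in statesDict[i+1]:
--             for k in statesDict[1]:
--                 if len(j&k) != 0: continue
--                 temp.add(j.union(k))
--         statesDict[i+2] = temp
--     return statesDict[gram_n]
-- ===== SOURCE B (Python) =====
-- def buildNGram(states, gram_n):
--     distinct = list(dict.fromkeys(states))
--     m = len(distinct)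
--
--     def combos(start, r):
--         if r == 0:
--             return [frozenset()]
--         out = []
--         for i in range(start, m - r + 1):
--             x = distinct[i]
--             for c in combos(i + 1, r - 1):
--                 out.append(c | {x})
--         return out
--
--     return set(combos(0, gram_n))
-- ===== Notes on version B (the rewrite author's own statement) =====
-- stated objective: alternative
-- what changed: B enumerates the gram_n-element combinations of the distinct states directly by recursion (each subset built exactly once, in order), instead of A's level-by-level growing of all k-element frozensets via pairwise-disjoint unions deduplicated through a set per level.
import Mathlib
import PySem

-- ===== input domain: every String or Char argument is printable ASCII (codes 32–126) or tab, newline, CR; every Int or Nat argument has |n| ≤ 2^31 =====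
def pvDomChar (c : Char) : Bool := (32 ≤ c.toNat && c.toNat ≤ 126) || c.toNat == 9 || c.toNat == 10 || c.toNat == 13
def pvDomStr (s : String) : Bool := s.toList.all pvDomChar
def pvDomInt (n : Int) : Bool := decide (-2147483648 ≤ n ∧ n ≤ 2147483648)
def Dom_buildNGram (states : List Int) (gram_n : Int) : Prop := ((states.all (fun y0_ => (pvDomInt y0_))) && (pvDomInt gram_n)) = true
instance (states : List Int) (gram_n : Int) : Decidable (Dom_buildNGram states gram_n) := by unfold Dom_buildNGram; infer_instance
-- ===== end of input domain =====

-- B re-implements buildNGram by direct recursive enumeration of the gram_n-element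
-- combinations of the distinct states (each subset built once), instead of A's
-- level-by-level disjoint-union expansion with a dedup set per level.


-- ===== PORT A =====
-- A frozenset of ints is encoded as its value-sorted, duplicate-free element list, so
-- Python's frozenset equality is exactly Lean list equality.  'j | k' must keep that
-- canonical form, hence the re-sort; 'j & k' (a filter of a sorted list) keeps it as is.
def fzUnion (s t : List Int) : List Int :=
  PySem.List.sorted (PySem.Set.union s t) (fun x => x) false

-- statesDict maps the keys 1..i+1 in insertion order; iteration i reads only
-- statesDict[1] (the base, constant) and statesDict[i+1] (the temp inserted by the previous
-- iteration), and the final lookup statesDict[gram_n] reads the LAST entry (the base when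
-- gram_n = 1).  The port therefore carries exactly those two live values through the same
-- loop, computing the same temp sets in the same order (a PySem.Dict here would make the
-- port quadratic in gram_n where Python's dict is O(1)).  statesDict[gram_n] raises
-- KeyError exactly when gram_n < 1 — excluded by Pre_.
def buildNGram (states : List Int) (gram_n : Int) : List (List Int) :=
  let statesFrozen := states.map (fun s => [s])
  let base := PySem.Set.ofList statesFrozen           -- statesDict[1]
  (PySem.List.pyRange 0 (gram_n - 1) 1).foldl
    (fun cur _i =>                                     -- cur = statesDict[i+1]
      cur.foldl (fun temp j =>
        base.foldl (fun temp k =>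
          if (PySem.Set.inter j k).length ≠ 0 then temp
          else PySem.Set.add temp (fzUnion j k)) temp) [])
    base                                               -- result: statesDict[gram_n]

-- ===== PORT B =====
def combosAt (d : List Int) (start : Int) (r : Int) : List (List Int) :=
  if r = 0 then [[]]
  else if r < 0 then []  -- Python: the recursion never returns here (IndexError); unreachable under Pre_
  else
    (PySem.List.pyRange start ((d.length : Int) - r + 1) 1).foldl
      (fun out i =>
        let x := PySem.List.pyGetD d i 0
        out ++ (combosAt d (i + 1) (r - 1)).map (fun c => fzUnion c [x])) []
termination_by r.toNat
decreasing_by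
  rename_i h1 h2
  omega

def buildNGram_alt (states : List Int) (gram_n : Int) : List (List Int) :=
  let distinct := PySem.List.dedup states
  PySem.Set.ofList (combosAt distinct 0 gram_n)

-- ===== PRECONDITION & SPEC =====
-- On gram_n < 1 the final dict lookup statesDict[gram_n] in A raises KeyError.
def Pre_buildNGram (states : List Int) (gram_n : Int) : Prop := 1 ≤ gram_n
instance (states : List Int) (gram_n : Int) : Decidable (Pre_buildNGram states gram_n) := by
  unfold Pre_buildNGram; infer_instance
def pvWitness_buildNGram : List Int × Int := ([0, 1, 2], 2)

def Spec_buildNGram (states : List Int) (gram_n : Int) (out : List (List Int)) : Prop :=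
  out = buildNGram_alt states gram_n
instance (states : List Int) (gram_n : Int) (out : List (List Int)) : Decidable (Spec_buildNGram states gram_n out) := by
  unfold Spec_buildNGram; infer_instance

-- ===== CLAIM (what is proved, stated in full; the proofs are below) =====
def Claim_equal_buildNGram : Prop := ∀ (states : List Int) (gram_n : Int), Dom_buildNGram states gram_n → Pre_buildNGram states gram_n → Spec_buildNGram states gram_n (buildNGram states gram_n)

-- ===== LEMMAS AND PROOFS =====

def pvRep (l : List Int) : List Int := PySem.List.sorted l (fun x => x) false

theorem pvRep_perm {l l' : List Int} (h : l.Perm l') : pvRep l = pvRep l' :=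
  PySem.List.sorted_eq_sorted_of_perm l l' (fun x => x) (fun _ _ h => h) h

theorem pvRep_single (x : Int) : pvRep [x] = [x] := by
  simp [pvRep, PySem.List.sorted, PySem.List.insertBy]

theorem pv_union_single {s : List Int} {x : Int} (h : x ∉ s) :
    PySem.Set.union s [x] = s ++ [x] := by
  simp [PySem.Set.union, PySem.Set.update, PySem.Set.add_of_not_mem h]

theorem fzUnion_pvRep {x : Int} {c : List Int} (h : x ∉ c) :
    fzUnion (pvRep c) [x] = pvRep (x :: c) := by
  have hx : x ∉ pvRep c := by
    simpa [pvRep, PySem.List.mem_sorted] using h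
  rw [fzUnion, pv_union_single hx]
  show pvRep (pvRep c ++ [x]) = pvRep (x :: c)
  exact pvRep_perm (((PySem.List.sorted_perm c (fun x => x) false).append_right [x]).trans
    List.perm_append_comm)

def Cc : List Int → Nat → List (List Int)
  | _, 0 => [[]]
  | [], _ + 1 => []
  | a :: e, t + 1 => (Cc e t).map (fun c => a :: c) ++ Cc e (t + 1)

theorem Cc_sublist {e c : List Int} {t : Nat} (h : c ∈ Cc e t) : c.Sublist e := by
  induction e generalizing c t with
  | nil => cases t with
    | zero => simp [Cc] at h; simp [h]
    | succ t => simp [Cc] at h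
  | cons a e ih =>
    cases t with
    | zero => simp [Cc] at h; simp [h]
    | succ t =>
      simp only [Cc, List.mem_append, List.mem_map] at h
      rcases h with ⟨c', hc', rfl⟩ | h
      · exact (ih hc').cons₂ a
      · exact (ih h).cons a

theorem Cc_nil_of_lt {e : List Int} {t : Nat} (h : e.length < t) : Cc e t = [] := by
  induction e generalizing t with
  | nil => cases t with
    | zero => simp at h
    | succ t => rfl
  | cons a e ih =>
    cases t with
    | zero => simp at h
    | succ t =>
      simp only [List.length_cons] at h
      rw [Cc, ih (show e.length < t by omega), ih (show e.length < t + 1 by omega)]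
      simp

theorem Cc_one (e : List Int) : Cc e 1 = e.map (fun x => [x]) := by
  induction e with
  | nil => rfl
  | cons a e ih => simp [Cc, ih]

theorem Cc_pairwise_perm {e : List Int} (he : e.Nodup) (t : Nat) :
    (Cc e t).Pairwise (fun c1 c2 => ¬ c1.Perm c2) := by
  induction e generalizing t with
  | nil => cases t <;> simp [Cc]
  | cons a e ih =>
    rcases List.nodup_cons.mp he with ⟨ha, he'⟩
    cases t with
    | zero => simp [Cc]
    | succ t =>
      rw [Cc, List.pairwise_append]
      refine ⟨(List.pairwise_map).mpr <| (ih he' t).imp (fun h hp => h hp.cons_inv),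
        ih he' (t+1), ?_⟩
      intro c1 h1 c2 h2 hp
      rcases List.mem_map.mp h1 with ⟨c', hc', rfl⟩
      have : a ∈ c2 := hp.mem_iff.mp (by simp)
      exact ha (List.Sublist.mem this (Cc_sublist h2))

theorem pv_mem_foldl_add {α : Type} [BEq α] [LawfulBEq α] {x : α} {acc : List α}
    (l : List α) (h : x ∈ acc) : x ∈ List.foldl PySem.Set.add acc l := by
  induction l generalizing acc with
  | nil => exact h
  | cons y l ih => exact ih ((PySem.Set.mem_add acc y x).mpr (Or.inl h))

theorem pv_foldl_add_shift {α : Type} [BEq α] [LawfulBEq α] (acc p l : List α)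
    (h : ∀ x ∈ l, x ∉ acc) :
    List.foldl PySem.Set.add (acc ++ p) l = acc ++ List.foldl PySem.Set.add p l := by
  induction l generalizing p with
  | nil => rfl
  | cons y l ih =>
    have hy : y ∉ acc := h y (by simp)
    have : PySem.Set.add (acc ++ p) y = acc ++ PySem.Set.add p y := by
      by_cases hp : y ∈ p
      · rw [PySem.Set.add_of_mem (by simp [hp]), PySem.Set.add_of_mem hp]
      · rw [PySem.Set.add_of_not_mem (by simp [hy, hp]), PySem.Set.add_of_not_mem hp,
          List.append_assoc]
    simp only [List.foldl_cons, this]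
    exact ih _ (fun x hx => h x (by simp [hx]))

theorem pv_foldl_add_disjoint {α : Type} [BEq α] [LawfulBEq α] (acc l : List α)
    (h : ∀ x ∈ l, x ∉ acc) :
    List.foldl PySem.Set.add acc l = acc ++ PySem.Set.ofList l := by
  rw [PySem.Set.ofList_eq_foldl]
  simpa using pv_foldl_add_shift acc [] l h

theorem pv_ofList_nodup {α : Type} [BEq α] [LawfulBEq α] {l : List α} (h : l.Nodup) :
    PySem.Set.ofList l = l := by
  induction l with
  | nil => rfl
  | cons y l ih =>
    rcases List.nodup_cons.mp h with ⟨hy, hl⟩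
    rw [PySem.Set.ofList_eq_foldl, List.foldl_cons, PySem.Set.add_of_not_mem (by simp)]
    show List.foldl PySem.Set.add ([y] ++ []) l = y :: l
    rw [pv_foldl_add_shift [y] [] l (by intro x hx; simp; rintro rfl; exact hy hx)]
    rw [← PySem.Set.ofList_eq_foldl, ih hl]
    rfl

theorem pv_foldl_add_map {α β : Type} [BEq α] [LawfulBEq α] [BEq β] [LawfulBEq β]
    (f : α → β) (acc l : List α)
    (hinj : ∀ a, (a ∈ acc ∨ a ∈ l) → ∀ b, (b ∈ acc ∨ b ∈ l) → f a = f b → a = b) :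
    List.foldl PySem.Set.add (acc.map f) (l.map f) = (List.foldl PySem.Set.add acc l).map f := by
  induction l generalizing acc with
  | nil => rfl
  | cons y l ih =>
    have hstep : PySem.Set.add (acc.map f) (f y) = (PySem.Set.add acc y).map f := by
      by_cases hy : y ∈ acc
      · rw [PySem.Set.add_of_mem (List.mem_map_of_mem hy), PySem.Set.add_of_mem hy]
      · rw [PySem.Set.add_of_not_mem ?_, PySem.Set.add_of_not_mem hy, List.map_append]
        · rfl
        intro hmem
        rcases List.mem_map.mp hmem with ⟨b, hb, hfb⟩
        exact hy (hinj y (Or.inr (by simp)) b (Or.inl hb) hfb.symm ▸ hb)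
    simp only [List.map_cons, List.foldl_cons, hstep]
    apply ih
    intro a ha b hb
    apply hinj <;> [skip; skip]
    · rcases ha with h | h
      · rcases (PySem.Set.mem_add acc y a).mp h with h | h
        · exact Or.inl h
        · exact Or.inr (by simp [h])
      · exact Or.inr (by simp [h])
    · rcases hb with h | h
      · rcases (PySem.Set.mem_add acc y b).mp h with h | h
        · exact Or.inl h
        · exact Or.inr (by simp [h])
      · exact Or.inr (by simp [h])

theorem pv_ofList_map {α β : Type} [BEq α] [LawfulBEq α] [BEq β] [LawfulBEq β]
    (f : α → β) (l : List α)
    (hinj : ∀ a ∈ l, ∀ b ∈ l, f a = f b → a = b) :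
    PySem.Set.ofList (l.map f) = (PySem.Set.ofList l).map f := by
  rw [PySem.Set.ofList_eq_foldl, PySem.Set.ofList_eq_foldl]
  exact pv_foldl_add_map f [] l (by
    intro a ha b hb
    simp only [List.mem_nil_iff, false_or] at ha hb
    exact hinj a ha b hb)

theorem pv_foldl_add_skip {α β : Type} [BEq α] [LawfulBEq α] (L : List β)
    (g : β → α) (h : β → List α) (acc : List α) (hg : ∀ c ∈ L, g c ∈ acc) :
    List.foldl PySem.Set.add acc (L.flatMap fun c => g c :: h c)
      = List.foldl PySem.Set.add acc (L.flatMap h) := by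
  induction L generalizing acc with
  | nil => rfl
  | cons c L ih =>
    simp only [List.flatMap_cons, List.foldl_append, List.foldl_cons]
    rw [PySem.Set.add_of_mem (hg c (by simp))]
    exact ih _ (fun c' hc' => pv_mem_foldl_add _ (hg c' (by simp [hc'])))

theorem pv_foldl_if_add {α β : Type} [BEq α] [LawfulBEq α] (P : β → Prop) [DecidablePred P]
    (f : β → α) (t0 : List α) (l : List β) :
    l.foldl (fun t k => if P k then t else PySem.Set.add t (f k)) t0
      = List.foldl PySem.Set.add t0 ((l.filter fun k => !decide (P k)).map f) := by
  induction l generalizing t0 with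
  | nil => rfl
  | cons y l ih =>
    by_cases hy : P y <;> simp [hy, ih]

theorem pv_foldl_foldl_add {α β : Type} [BEq α] [LawfulBEq α] (F : β → List α)
    (t0 : List α) (L : List β) :
    L.foldl (fun t j => List.foldl PySem.Set.add t (F j)) t0
      = List.foldl PySem.Set.add t0 (L.flatMap F) := by
  induction L generalizing t0 with
  | nil => rfl
  | cons j L ih => simp only [List.foldl_cons, List.flatMap_cons, List.foldl_append, ih]

def pvStream (e : List Int) (t : Nat) : List (List Int) :=
  (Cc e t).flatMap (fun c =>
    (e.filter fun x => !decide (x ∈ c)).map (fun x => pvRep (x :: c)))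

theorem mem_pvRep {x : Int} {l : List Int} : x ∈ pvRep l ↔ x ∈ l := by
  simp [pvRep, PySem.List.mem_sorted]

theorem pvRep_eq_iff {l l' : List Int} : pvRep l = pvRep l' ↔ l.Perm l' :=
  PySem.List.sorted_id_eq_sorted_id_iff_perm l l'

theorem pvRep_rep (w : List Int) : pvRep (pvRep w) = pvRep w :=
  pvRep_perm (PySem.List.sorted_perm w (fun x => x) false)

theorem pvRep_cons_rep (a : Int) (w : List Int) : pvRep (a :: pvRep w) = pvRep (a :: w) :=
  pvRep_perm ((PySem.List.sorted_perm w (fun x => x) false).cons a)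

theorem pvStream_rep {z : List Int} {e : List Int} {t : Nat} (h : z ∈ pvStream e t) :
    ∃ w, z = pvRep w := by
  simp only [pvStream, List.mem_flatMap, List.mem_map] at h
  rcases h with ⟨c, _, x, _, rfl⟩
  exact ⟨x :: c, rfl⟩

theorem pvG {e : List Int} (he : e.Nodup) (t : Nat) :
    PySem.Set.ofList (pvStream e t) = (Cc e (t + 1)).map pvRep := by
  induction e generalizing t with
  | nil =>
    cases t <;> simp [pvStream, Cc]
  | cons a e ih =>
    rcases List.nodup_cons.mp he with ⟨ha, he'⟩
    cases t with
    | zero =>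
      -- stream over the single empty combination: all singletons, already distinct
      have h0 : pvStream (a :: e) 0 = (a :: e).map (fun x => [x]) := by
        simp [pvStream, Cc, pvRep_single]
      rw [h0, Cc_one,
        pv_ofList_map (fun x => [x]) (a :: e) (by intro x _ y _ h; simpa using h),
        pv_ofList_nodup he, List.map_map]
      apply List.map_congr_left
      intro x _
      simp [pvRep_single]
    | succ s =>
      -- split the level into combinations containing a and those not
      have hsplit : pvStream (a :: e) (s + 1)
          = ((pvStream e s).map (fun z => pvRep (a :: z)))
            ++ (Cc e (s + 1)).flatMap (fun c =>
                 pvRep (a :: c) :: (e.filter fun x => !decide (x ∈ c)).map (fun x => pvRep (x :: c))) := by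
        rw [pvStream]
        show (Cc (a :: e) (s+1)).flatMap _ = _
        rw [Cc, List.flatMap_append, List.flatMap_map]
        congr 1
        · -- combinations containing a
          rw [pvStream, List.map_flatMap]
          apply List.flatMap_congr
          intro c hc
          have hfc : List.filter (fun x => !decide (x ∈ a :: c)) (a :: e)
              = List.filter (fun x => !decide (x ∈ c)) e := by
            have h1 : (!decide (a ∈ a :: c)) = false := by simp
            rw [List.filter_cons, h1]
            simp only [Bool.false_eq_true, if_false]
            apply List.filter_congr
            intro x hx
            have : x ≠ a := fun h => ha (h ▸ hx)
            simp [this]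
          rw [hfc, List.map_map]
          apply List.map_congr_left
          intro x _
          show pvRep (x :: a :: c) = pvRep (a :: pvRep (x :: c))
          rw [pvRep_cons_rep]
          exact pvRep_perm (List.Perm.swap a x c)
        · -- combinations not containing a: a is offered first, then the e-extensions
          apply List.flatMap_congr
          intro c hc
          have hac : a ∉ c := fun h => ha ((Cc_sublist hc).subset h)
          have h2 : (!decide (a ∈ c)) = true := by simp [hac]
          rw [List.filter_cons, h2]
          simp
      rw [hsplit, PySem.Set.ofList_eq_foldl, List.foldl_append, ← PySem.Set.ofList_eq_foldl]
      have hinj : ∀ z1 ∈ pvStream e s, ∀ z2 ∈ pvStream e s,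
          (fun z => pvRep (a :: z)) z1 = (fun z => pvRep (a :: z)) z2 → z1 = z2 := by
        intro z1 h1 z2 h2 h
        rcases pvStream_rep h1 with ⟨w1, rfl⟩
        rcases pvStream_rep h2 with ⟨w2, rfl⟩
        have hp : (a :: pvRep w1).Perm (a :: pvRep w2) := pvRep_eq_iff.mp h
        have : pvRep (pvRep w1) = pvRep (pvRep w2) := pvRep_perm hp.cons_inv
        rwa [pvRep_rep, pvRep_rep] at this
      have hACC : PySem.Set.ofList ((pvStream e s).map (fun z => pvRep (a :: z)))
          = (Cc e (s + 1)).map (fun c => pvRep (a :: c)) := by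
        rw [pv_ofList_map _ _ hinj, ih he' s, List.map_map]
        apply List.map_congr_left
        intro c _
        exact pvRep_cons_rep a c
      rw [hACC, pv_foldl_add_skip _ _ _ _ (by
          intro c hc
          exact List.mem_map_of_mem hc)]
      have hdisj : ∀ z ∈ (Cc e (s+1)).flatMap (fun c =>
            (e.filter fun x => !decide (x ∈ c)).map (fun x => pvRep (x :: c))),
          z ∉ (Cc e (s + 1)).map (fun c => pvRep (a :: c)) := by
        intro z hz hmem
        simp only [List.mem_flatMap, List.mem_map, List.mem_filter] at hz
        rcases hz with ⟨c, hc, x, ⟨hxe, hxc⟩, rfl⟩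
        rcases List.mem_map.mp hmem with ⟨c', _, heq⟩
        have hax : a ∈ pvRep (x :: c) := by
          rw [← heq]; exact mem_pvRep.mpr (by simp)
        have : a ∈ x :: c := mem_pvRep.mp hax
        rcases List.mem_cons.mp this with h | h
        · exact ha (h ▸ hxe)
        · exact ha ((Cc_sublist hc).subset h)
      rw [pv_foldl_add_disjoint _ _ hdisj]
      have : ((Cc e (s+1)).flatMap (fun c =>
          (e.filter fun x => !decide (x ∈ c)).map (fun x => pvRep (x :: c)))) = pvStream e (s+1) := rfl
      rw [this, ih he' (s+1)]
      show _ = (Cc (a :: e) (s + 1 + 1)).map pvRep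
      rw [Cc, List.map_append, List.map_map]
      rfl

theorem pv_inter_single (j : List Int) (x : Int) :
    ((PySem.Set.inter j [x]).length ≠ 0) ↔ x ∈ j := by
  constructor
  · intro h
    rcases List.exists_mem_of_length_pos (Nat.pos_of_ne_zero h) with ⟨y, hy⟩
    have : y ∈ j ∧ y ∈ [x] := by
      constructor
      · exact List.mem_of_mem_filter hy
      · have := List.of_mem_filter hy
        simpa [PySem.Set.contains_iff] using this
    rcases this with ⟨h1, h2⟩
    simp at h2; exact h2 ▸ h1
  · intro h hlen
    have : x ∈ PySem.Set.inter j [x] := by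
      simp [PySem.Set.mem_inter, h]
    rw [List.length_eq_zero_iff] at hlen
    simp [hlen] at this

def pvAstep (base : List (List Int)) (L : List (List Int)) : List (List Int) :=
  L.foldl (fun temp j =>
    base.foldl (fun temp k =>
      if (PySem.Set.inter j k).length ≠ 0 then temp
      else PySem.Set.add temp (fzUnion j k)) temp) []

theorem pvAstep_eq {e : List Int} (he : e.Nodup) (t : Nat) :
    pvAstep (e.map fun s => [s]) ((Cc e t).map pvRep) = (Cc e (t + 1)).map pvRep := by
  rw [pvAstep]
  have hinner : ∀ (temp : List (List Int)) (j : List Int),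
      (e.map fun s => [s]).foldl (fun temp k =>
        if (PySem.Set.inter j k).length ≠ 0 then temp
        else PySem.Set.add temp (fzUnion j k)) temp
      = List.foldl PySem.Set.add temp
          (((e.map fun s => [s]).filter fun k => !decide ((PySem.Set.inter j k).length ≠ 0)).map
            (fun k => fzUnion j k)) := by
    intro temp j
    exact pv_foldl_if_add (fun k => (PySem.Set.inter j k).length ≠ 0) (fun k => fzUnion j k) temp _
  simp only [hinner]
  rw [pv_foldl_foldl_add]
  rw [← PySem.Set.ofList_eq_foldl, List.flatMap_map]
  have hstream : ((Cc e t).flatMap fun c =>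
      (((e.map fun s => [s]).filter fun k => !decide ((PySem.Set.inter (pvRep c) k).length ≠ 0)).map
        (fun k => fzUnion (pvRep c) k))) = pvStream e t := by
    apply List.flatMap_congr
    intro c _
    rw [List.filter_map, List.map_map]
    have hfil : (List.filter ((fun k => !decide ((PySem.Set.inter (pvRep c) k).length ≠ 0)) ∘ fun s => [s]) e)
        = List.filter (fun x => !decide (x ∈ c)) e := by
      apply List.filter_congr
      intro x _
      simp only [Function.comp_apply]
      congr 1
      simp only [decide_eq_decide]
      rw [pv_inter_single (pvRep c) x, mem_pvRep]
    rw [hfil]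
    apply List.map_congr_left
    intro x hx
    have hxc : x ∉ c := by
      have := List.of_mem_filter hx
      simpa using this
    exact fzUnion_pvRep hxc
  rw [hstream]
  exact pvG he t

theorem pv_level1 (states : List Int) :
    PySem.Set.ofList (states.map fun s => [s])
      = (Cc (PySem.List.dedup states) 1).map pvRep := by
  rw [Cc_one, List.map_map]
  rw [pv_ofList_map (fun s => [s]) states (by intro a _ b _ h; simpa using h)]
  rw [← PySem.List.dedup_eq_ofList]
  apply List.map_congr_left
  intro x _
  simp [pvRep_single]

theorem pv_loop_inv (states : List Int) (k : Nat) :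
    (PySem.List.pyRange 0 (k : Int) 1).foldl
      (fun cur _i => pvAstep (PySem.Set.ofList (states.map fun s => [s])) cur)
      (PySem.Set.ofList (states.map fun s => [s]))
    = (Cc (PySem.List.dedup states) (k + 1)).map pvRep := by
  induction k with
  | zero =>
    rw [show ((0:Nat):Int) = 0 by rfl, PySem.List.pyRange_one_eq_nil le_rfl]
    simp only [List.foldl_nil, zero_add]
    exact pv_level1 states
  | succ k ih =>
    have hr : PySem.List.pyRange 0 ((k + 1 : Nat) : Int) 1
        = PySem.List.pyRange 0 (k : Int) 1 ++ [(k : Int)] := by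
      push_cast
      exact PySem.List.pyRange_one_succ_right (by positivity)
    rw [hr, List.foldl_append, List.foldl_cons, List.foldl_nil, ih]
    have hbase : PySem.Set.ofList (states.map fun s => [s])
        = (PySem.List.dedup states).map fun s => [s] := by
      rw [pv_level1 states, Cc_one, List.map_map]
      apply List.map_congr_left
      intro x _
      simp [pvRep_single]
    rw [hbase]
    exact pvAstep_eq (PySem.List.nodup_dedup states) (k + 1)

theorem pv_getElem_not_mem_drop {d : List Int} (hd : d.Nodup) {i : Nat} (h : i < d.length) :
    d[i] ∉ d.drop (i + 1) := by
  have h2 : d.drop i = d[i] :: d.drop (i + 1) := List.drop_eq_getElem_cons h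
  have h3 : (d.drop i).Nodup := hd.sublist (List.drop_sublist i d)
  rw [h2] at h3
  exact (List.nodup_cons.mp h3).1

theorem pv_combosAt_flatMap (d : List Int) (r : Nat) (start : Int) :
    combosAt d start ((r : Int) + 1)
      = (PySem.List.pyRange start ((d.length : Int) - ((r:Int) + 1) + 1) 1).flatMap
          (fun i => (combosAt d (i + 1) (r : Int)).map
            (fun c => fzUnion c [PySem.List.pyGetD d i 0])) := by
  rw [combosAt]
  rw [if_neg (by omega), if_neg (by omega)]
  have := PySem.List.foldl_append_eq_flatMap
    (fun i => (combosAt d (i + 1) ((r:Int) + 1 - 1)).map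
      (fun c => fzUnion c [PySem.List.pyGetD d i 0]))
    (PySem.List.pyRange start ((d.length : Int) - ((r:Int) + 1) + 1) 1) []
  simp only [List.nil_append] at this
  rw [this]
  norm_num

theorem pv_combosAt_eq {d : List Int} (hd : d.Nodup) :
    ∀ (r : Nat) (start : Nat),
      combosAt d (start : Int) (r : Int) = (Cc (d.drop start) r).map pvRep := by
  intro r
  induction r with
  | zero =>
    intro start
    rw [combosAt, if_pos (by norm_num : ((0:Nat):Int) = 0)]
    simp [Cc, pvRep]
    simp [PySem.List.sorted]
  | succ r ih =>
    intro start
    suffices H : ∀ n (start : Nat), d.length - start ≤ n →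
        combosAt d (start : Int) ((r : Int) + 1) = (Cc (d.drop start) (r + 1)).map pvRep by
      have := H (d.length - start) start le_rfl
      rwa [show ((r + 1 : Nat) : Int) = (r : Int) + 1 by push_cast; ring]
    intro n
    induction n with
    | zero =>
      intro start hn
      -- start beyond the list: empty range, no combinations
      rw [pv_combosAt_flatMap, PySem.List.pyRange_one_eq_nil (by
        have : d.length ≤ start := by omega
        omega)]
      rw [Cc_nil_of_lt (by simp; omega)]
      simp
    | succ n ihn =>
      intro start hn
      by_cases hs : (d.length : Int) - ((r:Int) + 1) + 1 ≤ (start : Int)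
      · rw [pv_combosAt_flatMap, PySem.List.pyRange_one_eq_nil hs]
        rw [Cc_nil_of_lt (by simp; omega)]
        simp
      · rw [not_le] at hs
        have hslen : start < d.length := by omega
        rw [pv_combosAt_flatMap, PySem.List.pyRange_one_cons (by omega), List.flatMap_cons]
        have hrest : (PySem.List.pyRange ((start:Int) + 1) ((d.length : Int) - ((r:Int) + 1) + 1) 1).flatMap
              (fun i => (combosAt d (i + 1) (r : Int)).map
                (fun c => fzUnion c [PySem.List.pyGetD d i 0]))
            = combosAt d ((start:Int) + 1) ((r:Int) + 1) := by
          rw [pv_combosAt_flatMap]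
        have hx : PySem.List.pyGetD d (start : Int) 0 = d[start] := by
          rw [PySem.List.pyGetD_eq_getElem d 0 (by positivity) (by exact_mod_cast hslen)]
          simp
        have hblock : (combosAt d ((start:Int) + 1) (r : Int)).map
              (fun c => fzUnion c [PySem.List.pyGetD d (start:Int) 0])
            = ((Cc (d.drop (start+1)) r).map (fun c => pvRep (d[start] :: c))) := by
          rw [show ((start:Int) + 1) = ((start + 1 : Nat) : Int) by push_cast; ring, ih (start + 1),
            List.map_map, hx]
          apply List.map_congr_left
          intro c hc
          have hxc : d[start] ∉ c := fun hmem =>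
            pv_getElem_not_mem_drop hd hslen ((Cc_sublist hc).subset hmem)
          exact fzUnion_pvRep hxc
        rw [hblock, hrest]
        rw [show ((start:Int) + 1) = ((start + 1 : Nat) : Int) by push_cast; ring,
          ihn (start + 1) (by omega)]
        rw [List.drop_eq_getElem_cons hslen, Cc, List.map_append, List.map_map]
        simp [Function.comp]

theorem Cc_map_rep_nodup {e : List Int} (he : e.Nodup) (t : Nat) :
    ((Cc e t).map pvRep).Nodup := by
  unfold List.Nodup
  rw [List.pairwise_map]
  exact (Cc_pairwise_perm he t).imp (fun h heq => h (pvRep_eq_iff.mp heq))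

theorem pv_main (states : List Int) (gram_n : Int) (hpre : 1 ≤ gram_n) :
    (PySem.List.pyRange 0 (gram_n - 1) 1).foldl
      (fun cur _i => pvAstep (PySem.Set.ofList (states.map fun s => [s])) cur)
      (PySem.Set.ofList (states.map fun s => [s]))
    = PySem.Set.ofList (combosAt (PySem.List.dedup states) 0 gram_n) := by
  set N := gram_n.toNat with hNdef
  have hg : gram_n = (N : Int) := by omega
  have hN : 1 ≤ N := by omega
  have hA : (PySem.List.pyRange 0 (gram_n - 1) 1).foldl
        (fun cur _i => pvAstep (PySem.Set.ofList (states.map fun s => [s])) cur)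
        (PySem.Set.ofList (states.map fun s => [s]))
      = (Cc (PySem.List.dedup states) ((N - 1) + 1)).map pvRep := by
    rw [show gram_n - 1 = ((N - 1 : Nat) : Int) by omega]
    exact pv_loop_inv states (N - 1)
  have hB : PySem.Set.ofList (combosAt (PySem.List.dedup states) 0 gram_n)
      = (Cc (PySem.List.dedup states) N).map pvRep := by
    rw [show (0 : Int) = ((0 : Nat) : Int) by rfl, hg,
      pv_combosAt_eq (PySem.List.nodup_dedup states) N 0, List.drop_zero]
    exact pv_ofList_nodup (Cc_map_rep_nodup (PySem.List.nodup_dedup states) N)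
  rw [hA, hB, show N - 1 + 1 = N by omega]

-- ===== VERDICT (by name: the statement is the Claim_ definition above) =====
theorem buildNGram_spec : Claim_equal_buildNGram := by
  intro states gram_n _ hpre
  unfold Pre_buildNGram at hpre
  unfold Spec_buildNGram
  exact pv_main states gram_n hpre
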